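-- pv_equiv track=rewrite | github.com/KingTugce/algo-exercises | aaaa.py | pair_zeros
-- ===== SOURCE A (Python) =====
-- def pair_zeros(digits):
--   output = []
--   zero_count = 0
--   for num in digits:
--     if num == 0 and zero_count == 0:
--       output.append(num)
--       zero_count += 1
--     elif num == 0 and zero_count == 1:
--       zero_count -= 1
--     else:
--       output.append(num)
--   return output
-- ===== SOURCE B (Python) =====
-- def pair_zeros(digits):
--     lst = list(digits)
--     n = len(lst)
--     out = []
--     i = 0
--     while i < n:
--         x = lst[i]
--         out.append(x)
--         i += 1
--         if x == 0:
--             # copy the run up to the partner zero, then drop that zero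
--             while i < n and lst[i] != 0:
--                 out.append(lst[i])
--                 i += 1
--             if i < n:
--                 i += 1  # remove the paired zero
--     return out
-- ===== Notes on version B (the rewrite author's own statement) =====
-- stated objective: alternative
-- what changed: Replaces the single-pass parity toggle with a nested skip-to-partner scan: after emitting a zero, an inner loop copies elements until the partner zero, which is dropped.
import Mathlib
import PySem

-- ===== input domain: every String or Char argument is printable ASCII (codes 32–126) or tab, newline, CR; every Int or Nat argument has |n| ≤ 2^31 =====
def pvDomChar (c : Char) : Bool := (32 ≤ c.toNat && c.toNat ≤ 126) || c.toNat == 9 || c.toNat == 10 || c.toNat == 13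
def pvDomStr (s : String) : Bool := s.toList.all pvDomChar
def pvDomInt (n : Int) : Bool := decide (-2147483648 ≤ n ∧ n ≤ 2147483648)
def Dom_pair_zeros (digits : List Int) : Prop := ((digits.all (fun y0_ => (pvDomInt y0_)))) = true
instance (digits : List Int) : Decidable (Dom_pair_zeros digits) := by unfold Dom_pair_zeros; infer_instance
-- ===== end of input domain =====

-- B replaces A's single-pass parity toggle by a nested skip-to-partner scan (same O(n) cost, different decomposition); return values only, no mutation.

-- ===== PORT A =====
-- A: one pass with accumulator (output, zero_count); zero_count toggles 0/1 on each zero.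
def pair_zeros (digits : List Int) : List Int :=
  (digits.foldl (fun (s : List Int × Int) num =>
      if num = 0 ∧ s.2 = 0 then (s.1 ++ [num], s.2 + 1)
      else if num = 0 ∧ s.2 = 1 then (s.1, s.2 - 1)
      else (s.1 ++ [num], s.2)) ([], 0)).1

-- ===== PORT B =====
-- B: outer scan emits elements; after emitting a zero, the inner scan (pzAfter) copies
-- elements until the partner zero, which is dropped, then control returns to the outer scan.
mutual
def pzGo : List Int → List Int
  | [] => []
  | x :: rest => if x = 0 then x :: pzAfter rest else x :: pzGo rest
def pzAfter : List Int → List Int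
  | [] => []
  | y :: rest => if y = 0 then pzGo rest else y :: pzAfter rest
end

def pair_zeros_alt (digits : List Int) : List Int := pzGo digits

-- ===== PRECONDITION & SPEC =====
def Spec_pair_zeros (digits : List Int) (out : List Int) : Prop := out = pair_zeros_alt digits
instance (digits : List Int) (out : List Int) : Decidable (Spec_pair_zeros digits out) := by unfold Spec_pair_zeros; infer_instance

-- ===== CLAIM (what is proved, stated in full; the proofs are below) =====
def Claim_equal_pair_zeros : Prop := ∀ (digits : List Int), Dom_pair_zeros digits → Spec_pair_zeros digits (pair_zeros digits)

-- ===== LEMMAS AND PROOFS =====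

-- Loop invariant for A's fold: starting with toggle 0 it computes pzGo, with toggle 1 it computes pzAfter.
theorem pair_zeros_fold_inv (xs : List Int) : ∀ (out : List Int),
    ((xs.foldl (fun (s : List Int × Int) num =>
      if num = 0 ∧ s.2 = 0 then (s.1 ++ [num], s.2 + 1)
      else if num = 0 ∧ s.2 = 1 then (s.1, s.2 - 1)
      else (s.1 ++ [num], s.2)) (out, 0)).1 = out ++ pzGo xs)
    ∧ ((xs.foldl (fun (s : List Int × Int) num =>
      if num = 0 ∧ s.2 = 0 then (s.1 ++ [num], s.2 + 1)
      else if num = 0 ∧ s.2 = 1 then (s.1, s.2 - 1)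
      else (s.1 ++ [num], s.2)) (out, 1)).1 = out ++ pzAfter xs) := by
  induction xs with
  | nil => intro out; simp [pzGo, pzAfter]
  | cons x rest ih =>
    intro out
    constructor
    · by_cases hx : x = 0
      · subst hx
        simpa [List.foldl, pzGo] using (ih (out ++ [(0 : Int)])).2
      · simpa [List.foldl, hx, pzGo] using (ih (out ++ [x])).1
    · by_cases hx : x = 0
      · subst hx
        simpa [List.foldl, pzAfter] using (ih out).1
      · simpa [List.foldl, hx, pzAfter] using (ih (out ++ [x])).2

-- ===== VERDICT (by name: the statement is the Claim_ definition above) =====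
theorem pair_zeros_spec : Claim_equal_pair_zeros := by
  intro digits _
  unfold Spec_pair_zeros pair_zeros pair_zeros_alt
  simpa using (pair_zeros_fold_inv digits []).1
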